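-- pv_equiv track=rewrite | github.com/LahiruHW/portfolio | DYNAMIC PROGRAMMING PRACTICE/Hackerrank/Bricks Game/bricks_game (recursive_1).py | aux
-- ===== SOURCE A (Python) =====
-- def aux(i, arr, memo):
--     if i >= len(arr):       # you shouldn't need such a condition in the
--         return 0
--
--     elif memo[i] != -1:
--         return memo[i]
--
--     else:
--         memo[i]=  max(
--             arr[i] + aux(i+4, arr, memo),
--             sum(arr[i:i+2]) + aux(i+6, arr, memo),
--             sum(arr[i:i+3]) + aux(i+8, arr, memo),
--         )
--         return memo[i]
--
-- arr = [1, 2, 3,4, 5]        # 6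
-- ===== SOURCE B (Python) =====
-- def aux(i, arr, memo):
--     # Iterative bottom-up DP over the states j = n-1 .. i (return value only; does not mutate memo).
--     n = len(arr)
--     dp = {}
--     j = n - 1
--     while j >= i:
--         m = memo[j]
--         if m != -1:
--             dp[j] = m
--         else:
--             t1 = arr[j] + (dp[j + 4] if j + 4 < n else 0)
--             t2 = sum(arr[j:j + 2]) + (dp[j + 6] if j + 6 < n else 0)
--             t3 = sum(arr[j:j + 3]) + (dp[j + 8] if j + 8 < n else 0)
--             dp[j] = max(t1, t2, t3)
--         j -= 1
--     return dp[i] if i < n else 0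
-- ===== Notes on version B (the rewrite author's own statement) =====
-- stated objective: alternative
-- what changed: Replaces A's top-down memoized recursion (which mutates memo in place) with an iterative bottom-up while loop that fills a fresh dict dp from j = len(arr)-1 down to i and never mutates memo; equivalence is about the return value only.
-- outside the precondition, e.g. on aux(1, [1, 2, 3], [-1, 5]): A returns 5, B raises IndexError; on aux(-5, [2, 1, 3, -1, 4, 5], [-1, -1, -1, -1, -1, -1]): A returns 18, B returns 14
import Mathlib
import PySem

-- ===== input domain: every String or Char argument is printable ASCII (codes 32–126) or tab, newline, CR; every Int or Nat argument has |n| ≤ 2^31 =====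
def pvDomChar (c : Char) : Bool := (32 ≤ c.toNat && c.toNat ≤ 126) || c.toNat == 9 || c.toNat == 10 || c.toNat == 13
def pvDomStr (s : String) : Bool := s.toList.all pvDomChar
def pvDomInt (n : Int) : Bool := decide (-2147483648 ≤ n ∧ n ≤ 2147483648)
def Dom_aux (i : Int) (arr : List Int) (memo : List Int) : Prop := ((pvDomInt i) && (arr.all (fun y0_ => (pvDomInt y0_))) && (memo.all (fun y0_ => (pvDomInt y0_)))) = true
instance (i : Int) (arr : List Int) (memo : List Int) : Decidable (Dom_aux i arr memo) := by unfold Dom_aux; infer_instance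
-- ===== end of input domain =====

-- B replaces A's top-down memoized recursion by an iterative bottom-up DP; equivalence is about the
-- RETURN value only: Python A mutates its memo argument in place, B never mutates memo.

-- termination lemmas for the ports (cited in decreasing_by)
theorem pvDecrA (n j k : Int) (h : ¬ n ≤ j) (hk : 1 ≤ k) : (n - (j + k)).toNat < (n - j).toNat := by
  omega

theorem pvDecrB (i j : Int) (h : i ≤ j) : (j - 1 - i + 1).toNat < (j - i + 1).toNat := by
  omega

-- ===== PORT A =====
-- A mutates memo, so the recursion is ported threading the memo list as state.
def auxGo (arr : List Int) (i : Int) (memo : List Int) : Int × List Int :=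
  if _h : (arr.length : Int) ≤ i then (0, memo)
  else if PySem.List.pyGetD memo i 0 ≠ -1 then (PySem.List.pyGetD memo i 0, memo)
  else
    let p1 := auxGo arr (i + 4) memo
    let p2 := auxGo arr (i + 6) p1.2
    let p3 := auxGo arr (i + 8) p2.2
    let v := max (max (PySem.List.pyGetD arr i 0 + p1.1)
                      ((PySem.List.slice arr (some i) (some (i + 2))).sum + p2.1))
                 ((PySem.List.slice arr (some i) (some (i + 3))).sum + p3.1)
    (v, PySem.List.pySetD p3.2 i v)
termination_by ((arr.length : Int) - i).toNat
decreasing_by all_goals exact pvDecrA _ _ _ _h (by decide)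

def aux (i : Int) (arr : List Int) (memo : List Int) : Int := (auxGo arr i memo).1

-- ===== PORT B =====
-- the while loop of Source B: j counts down from len(arr)-1 to i, filling the dict dp
def bGo (arr : List Int) (memo : List Int) (i : Int) (j : Int) (dp : PySem.Dict Int Int) : PySem.Dict Int Int :=
  if _h : i ≤ j then
    let m := PySem.List.pyGetD memo j 0
    let dp' :=
      if m ≠ -1 then dp.insert j m
      else
        let t1 := PySem.List.pyGetD arr j 0 + (if j + 4 < (arr.length : Int) then dp.getD (j + 4) 0 else 0)
        let t2 := (PySem.List.slice arr (some j) (some (j + 2))).sum + (if j + 6 < (arr.length : Int) then dp.getD (j + 6) 0 else 0)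
        let t3 := (PySem.List.slice arr (some j) (some (j + 3))).sum + (if j + 8 < (arr.length : Int) then dp.getD (j + 8) 0 else 0)
        dp.insert j (max (max t1 t2) t3)
    bGo arr memo i (j - 1) dp'
  else dp
termination_by (j - i + 1).toNat
decreasing_by exact pvDecrB _ _ _h

def aux_alt (i : Int) (arr : List Int) (memo : List Int) : Int :=
  let dp := bGo arr memo i ((arr.length : Int) - 1) PySem.Dict.empty
  -- dp[i]: the key i is always present when i < len(arr) (the loop processed j = i), so getD is exact
  if i < (arr.length : Int) then dp.getD i 0 else 0

-- ===== PRECONDITION & SPEC =====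
-- Pre_ restricts to the natural domain of the DP: a non-negative state index and a memo table at least
-- as long as arr (the states the recursion may touch).  Excluded although A sometimes still returns there:
-- negative i, where A's value goes through Python's negative-index wraparound into memo (reads AND writes,
-- which can alias positive states), and memo shorter than arr, where A returns only when pre-filled
-- entries happen to cut the recursion before the IndexError.
def Pre_aux (i : Int) (arr : List Int) (memo : List Int) : Prop :=
  0 ≤ i ∧ (i < (arr.length : Int) → (arr.length : Int) ≤ (memo.length : Int))
instance (i : Int) (arr : List Int) (memo : List Int) : Decidable (Pre_aux i arr memo) := by unfold Pre_aux; infer_instance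

def pvWitness_aux : Int × List Int × List Int := (0, [1, 2, 3, 4, 5], [-1, -1, -1, -1, -1])

def Spec_aux (i : Int) (arr : List Int) (memo : List Int) (out : Int) : Prop := out = aux_alt i arr memo
instance (i : Int) (arr : List Int) (memo : List Int) (out : Int) : Decidable (Spec_aux i arr memo out) := by unfold Spec_aux; infer_instance

-- ===== CLAIM (what is proved, stated in full; the proofs are below) =====
def Claim_equal_aux : Prop := ∀ (i : Int) (arr : List Int) (memo : List Int), Dom_aux i arr memo → Pre_aux i arr memo → Spec_aux i arr memo (aux i arr memo)

-- ===== LEMMAS AND PROOFS =====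

-- the pure DP value of state j over the ORIGINAL memo: both ports compute this
def gDP (arr : List Int) (memo0 : List Int) (j : Int) : Int :=
  if _h : (arr.length : Int) ≤ j then 0
  else if PySem.List.pyGetD memo0 j 0 ≠ -1 then PySem.List.pyGetD memo0 j 0
  else max (max (PySem.List.pyGetD arr j 0 + gDP arr memo0 (j + 4))
                ((PySem.List.slice arr (some j) (some (j + 2))).sum + gDP arr memo0 (j + 6)))
           ((PySem.List.slice arr (some j) (some (j + 3))).sum + gDP arr memo0 (j + 8))
termination_by ((arr.length : Int) - j).toNat
decreasing_by all_goals exact pvDecrA _ _ _ _h (by decide)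

-- invariant on A's mutated memo: each cell is either untouched or already holds its DP value
def MemoOK (arr : List Int) (memo0 : List Int) (memo : List Int) : Prop :=
  memo.length = memo0.length ∧
  ∀ k : Nat, memo.getD k 0 = memo0.getD k 0 ∨
    ((k : Int) < (arr.length : Int) ∧ memo.getD k 0 = gDP arr memo0 (k : Int))

theorem pyGetD_toNat {A : Type} (xs : List A) (j : Int) (d : A) (hj : 0 ≤ j) :
    PySem.List.pyGetD xs j d = xs.getD j.toNat d := by
  have h := PySem.List.pyGetD_natCast xs j.toNat d
  rwa [Int.toNat_of_nonneg hj] at h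

theorem getD_set_self (l : List Int) (n : Nat) (a d : Int) (h : n < l.length) :
    (l.set n a).getD n d = a := by
  simp [List.getD_eq_getElem?_getD, h]

theorem getD_set_ne (l : List Int) (n k : Nat) (a d : Int) (h : n ≠ k) :
    (l.set n a).getD k d = l.getD k d := by
  simp [List.getD_eq_getElem?_getD, h]

theorem gDP_oor (arr memo0 : List Int) (j : Int) (h : (arr.length : Int) ≤ j) :
    gDP arr memo0 j = 0 := by
  rw [gDP, dif_pos h]

theorem gDP_filled (arr memo0 : List Int) (j : Int) (hj : 0 ≤ j) (hlt : ¬ (arr.length : Int) ≤ j)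
    (h : memo0.getD j.toNat 0 ≠ -1) : gDP arr memo0 j = memo0.getD j.toNat 0 := by
  rw [gDP, dif_neg hlt, pyGetD_toNat memo0 j 0 hj, if_pos h]

theorem auxGo_spec (arr memo0 : List Int) (hlen : (arr.length : Int) ≤ (memo0.length : Int))
    (j : Int) (memo : List Int) (hj : 0 ≤ j) (hm : MemoOK arr memo0 memo) :
    (auxGo arr j memo).1 = gDP arr memo0 j ∧ MemoOK arr memo0 (auxGo arr j memo).2 := by
  by_cases hge : (arr.length : Int) ≤ j
  · rw [auxGo, dif_pos hge, gDP, dif_pos hge]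
    exact ⟨rfl, hm⟩
  · have hlm : memo.length = memo0.length := hm.1
    have hjc : ((j.toNat : Nat) : Int) = j := Int.toNat_of_nonneg hj
    have hread : PySem.List.pyGetD memo j 0 = memo.getD j.toNat 0 := pyGetD_toNat memo j 0 hj
    have hdisj := hm.2 j.toNat
    rw [hjc] at hdisj
    rw [auxGo, dif_neg hge, hread]
    by_cases h1 : memo.getD j.toNat 0 = -1
    · have h0 : memo0.getD j.toNat 0 = -1 := by
        by_contra h0
        rcases hdisj with hc | hc
        · exact h0 (hc ▸ h1)
        · have hg := gDP_filled arr memo0 j hj hge h0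
          rw [hc.2, hg] at h1
          exact h0 h1
      rw [if_neg (not_not_intro h1)]
      simp only []
      obtain ⟨e1, m1⟩ := auxGo_spec arr memo0 hlen (j + 4) memo (by omega) hm
      obtain ⟨e2, m2⟩ := auxGo_spec arr memo0 hlen (j + 6) (auxGo arr (j + 4) memo).2 (by omega) m1
      obtain ⟨e3, m3⟩ := auxGo_spec arr memo0 hlen (j + 8) (auxGo arr (j + 6) (auxGo arr (j + 4) memo).2).2 (by omega) m2
      have hv : max (max (PySem.List.pyGetD arr j 0 + (auxGo arr (j + 4) memo).1)
            ((PySem.List.slice arr (some j) (some (j + 2))).sum + (auxGo arr (j + 6) (auxGo arr (j + 4) memo).2).1))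
          ((PySem.List.slice arr (some j) (some (j + 3))).sum + (auxGo arr (j + 8) (auxGo arr (j + 6) (auxGo arr (j + 4) memo).2).2).1)
          = gDP arr memo0 j := by
        rw [e1, e2, e3]
        conv_rhs => rw [gDP]
        rw [dif_neg hge, pyGetD_toNat memo0 j 0 hj, if_neg (not_not_intro h0)]
      refine ⟨hv, ?_⟩
      rw [PySem.List.pySetD_of_nonneg _ _ hj]
      have hlen3 := m3.1
      refine ⟨by simp [hlen3], ?_⟩
      intro k
      by_cases hk : k = j.toNat
      · subst hk
        right
        refine ⟨by omega, ?_⟩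
        rw [getD_set_self _ _ _ _ (by omega), hjc, hv]
      · rw [getD_set_ne _ _ _ _ _ (fun h => hk h.symm)]
        exact m3.2 k
    · have hgj : memo.getD j.toNat 0 = gDP arr memo0 j := by
        rcases hdisj with hc | hc
        · rw [hc, gDP_filled arr memo0 j hj hge (hc ▸ h1)]
        · exact hc.2
      rw [if_pos h1]
      exact ⟨hgj, hm⟩
termination_by ((arr.length : Int) - j).toNat
decreasing_by all_goals omega

theorem bGo_spec (arr memo : List Int) (i : Int) (hi : 0 ≤ i) (j : Int) (dp : PySem.Dict Int Int)
    (hjn : j < (arr.length : Int))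
    (hdp : ∀ k : Int, j < k → k < (arr.length : Int) → dp.getD k 0 = gDP arr memo k) :
    ∀ k : Int, i ≤ k → k < (arr.length : Int) → (bGo arr memo i j dp).getD k 0 = gDP arr memo k := by
  by_cases hij : i ≤ j
  · rw [bGo, dif_pos hij]
    simp only []
    have hge : ¬ (arr.length : Int) ≤ j := by omega
    have hc4 : (if j + 4 < (arr.length : Int) then dp.getD (j + 4) 0 else 0) = gDP arr memo (j + 4) := by
      split_ifs with h
      · exact hdp (j + 4) (by omega) h
      · exact (gDP_oor arr memo (j + 4) (by omega)).symm
    have hc6 : (if j + 6 < (arr.length : Int) then dp.getD (j + 6) 0 else 0) = gDP arr memo (j + 6) := by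
      split_ifs with h
      · exact hdp (j + 6) (by omega) h
      · exact (gDP_oor arr memo (j + 6) (by omega)).symm
    have hc8 : (if j + 8 < (arr.length : Int) then dp.getD (j + 8) 0 else 0) = gDP arr memo (j + 8) := by
      split_ifs with h
      · exact hdp (j + 8) (by omega) h
      · exact (gDP_oor arr memo (j + 8) (by omega)).symm
    apply bGo_spec arr memo i hi (j - 1) _ (by omega)
    intro k hk1 hk2
    rw [hc4, hc6, hc8]
    by_cases hkj : k = j
    · rw [hkj]
      by_cases hm : PySem.List.pyGetD memo j 0 ≠ -1
      · rw [if_pos hm, PySem.Dict.getD_insert, if_pos rfl, gDP, dif_neg hge, if_pos hm]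
      · rw [if_neg hm, PySem.Dict.getD_insert, if_pos rfl]
        conv_rhs => rw [gDP]
        rw [dif_neg hge, if_neg hm]
    · have hjk : j < k := by omega
      by_cases hm : PySem.List.pyGetD memo j 0 ≠ -1
      · rw [if_pos hm, PySem.Dict.getD_insert, if_neg hkj]
        exact hdp k hjk hk2
      · rw [if_neg hm, PySem.Dict.getD_insert, if_neg hkj]
        exact hdp k hjk hk2
  · rw [bGo, dif_neg hij]
    intro k hk1 hk2
    exact hdp k (by omega) hk2
termination_by (j - i + 1).toNat
decreasing_by omega

-- ===== VERDICT (by name: the statement is the Claim_ definition above) =====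
theorem aux_spec : Claim_equal_aux := by
  intro i arr memo _hd hpre
  obtain ⟨hi, hlen⟩ := hpre
  unfold Spec_aux aux aux_alt
  by_cases hlt : i < (arr.length : Int)
  · have hA := auxGo_spec arr memo (hlen hlt) i memo hi
      ⟨rfl, fun k => Or.inl rfl⟩
    have hB := bGo_spec arr memo i hi ((arr.length : Int) - 1) PySem.Dict.empty
      (by omega) (fun k hk1 hk2 => absurd hk2 (by omega)) i le_rfl hlt
    simp only [if_pos hlt, hA.1, hB]
  · have h0 : (arr.length : Int) ≤ i := by omega
    simp only [if_neg hlt]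
    unfold auxGo
    rw [dif_pos h0]
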